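-- pv_equiv track=rewrite | github.com/sceriff0/attend_image_analysis | bin/collect_channels.py | sort_paths_by_marker
-- ===== SOURCE A (Python) =====
-- def sort_paths_by_marker(list_of_lists, list_of_orders):
--     """
--     Sorts each inner list of paths based on its corresponding marker order.
--
--     Parameters:
--     - list_of_lists: List of lists of file paths.
--     - list_of_orders: List of marker orders corresponding to each inner list.
--
--     Returns:
--     - Sorted list of lists.
--     """
--     sorted_lists = []
--
--     for paths, marker_order in zip(list_of_lists, list_of_orders):
--         sorted_paths = sorted(
--             paths,
--             key=lambda x: marker_order.index(x.split(".nd2_")[-1].split(".tif")[0]),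
--         )
--         sorted_lists.append(sorted_paths)
--
--     return sorted_lists
-- ===== SOURCE B (Python) =====
-- def sort_paths_by_marker(list_of_lists, list_of_orders):
--     """
--     Groups each inner list of paths into per-marker buckets, then emits the
--     buckets in marker-order sequence (a distribution pass instead of a
--     comparison sort).
--     """
--     result = []
--     for paths, marker_order in zip(list_of_lists, list_of_orders):
--         buckets = {}
--         for p in paths:
--             marker = p.split(".nd2_")[-1].split(".tif")[0]
--             buckets.setdefault(marker, []).append(p)
--         result.append([p for m in marker_order for p in buckets.pop(m, [])])
--     return result
-- ===== Notes on version B (the rewrite author's own statement) =====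
-- stated objective: alternative
-- what changed: Replaces the stable comparison sort keyed by marker_order.index with a bucket pass: paths are grouped into a dict of per-marker buckets in one scan, then one sweep over marker_order pops each bucket into the output; Pre_ excludes inputs where some path's marker is absent from its marker order, on which A raises ValueError from list.index.
import Mathlib
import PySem

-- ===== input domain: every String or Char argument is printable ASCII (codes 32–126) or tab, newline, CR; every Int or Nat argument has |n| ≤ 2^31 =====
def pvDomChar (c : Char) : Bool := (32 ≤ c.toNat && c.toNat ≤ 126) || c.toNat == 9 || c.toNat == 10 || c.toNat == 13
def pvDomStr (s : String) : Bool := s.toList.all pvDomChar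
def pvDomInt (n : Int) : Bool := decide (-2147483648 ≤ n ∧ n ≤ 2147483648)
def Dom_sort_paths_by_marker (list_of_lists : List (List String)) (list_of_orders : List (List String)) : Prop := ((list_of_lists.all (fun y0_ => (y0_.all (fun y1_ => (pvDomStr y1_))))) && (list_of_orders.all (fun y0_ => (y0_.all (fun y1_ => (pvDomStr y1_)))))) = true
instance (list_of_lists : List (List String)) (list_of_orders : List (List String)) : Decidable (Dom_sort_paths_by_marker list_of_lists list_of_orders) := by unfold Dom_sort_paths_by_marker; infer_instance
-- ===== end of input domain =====

-- B replaces A's comparison sort keyed by marker_order.index with a per-marker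
-- bucket dict emitted in marker-order sequence (alternative algorithm).

-- ===== PORT A =====
-- shared marker extraction: x.split(".nd2_")[-1].split(".tif")[0]
-- (split? is none only for an empty separator, and split results are nonempty,
--  so the getD defaults are unreachable)
def pvMarkerOf (p : String) : String :=
  let parts := (PySem.Str.split? p ".nd2_").getD []
  let last := (PySem.List.pyGet? parts (-1)).getD ""
  let parts2 := (PySem.Str.split? last ".tif").getD []
  (PySem.List.pyGet? parts2 0).getD ""

-- A: for each zipped pair, stable sort of paths by marker_order.index(marker).
-- list.index raises ValueError when the marker is absent (outside Pre_); the
-- port totalizes that key with getD marker_order.length, never reached under Pre_.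
def sort_paths_by_marker (list_of_lists : List (List String)) (list_of_orders : List (List String)) : List (List String) :=
  (list_of_lists.zip list_of_orders).foldl
    (fun sorted_lists pr =>
      sorted_lists ++
        [PySem.List.sorted pr.1
          (fun x => (PySem.List.index? pr.2 (pvMarkerOf x)).getD pr.2.length)])
    []

-- ===== PORT B =====
-- B: group paths into per-marker buckets (setdefault+append = modify with ++ [p]),
-- then one pass over marker_order popping each bucket (pop(m, []) = getD then erase).
def sort_paths_by_marker_alt (list_of_lists : List (List String)) (list_of_orders : List (List String)) : List (List String) :=
  (list_of_lists.zip list_of_orders).foldl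
    (fun result pr =>
      let buckets := pr.1.foldl
        (fun d p => d.modify (pvMarkerOf p) [] (· ++ [p])) PySem.Dict.empty
      let fin := pr.2.foldl
        (fun st m => (st.1 ++ st.2.getD m [], st.2.erase m))
        (([] : List String), buckets)
      result ++ [fin.1])
    []

-- ===== PRECONDITION & SPEC =====
-- Pre_ excludes exactly the inputs on which A raises ValueError (list.index on a
-- marker absent from that pair's marker order); B drops such paths instead.
def Pre_sort_paths_by_marker (list_of_lists : List (List String)) (list_of_orders : List (List String)) : Prop :=
  ∀ pr ∈ list_of_lists.zip list_of_orders, ∀ p ∈ pr.1, pvMarkerOf p ∈ pr.2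
instance (list_of_lists : List (List String)) (list_of_orders : List (List String)) : Decidable (Pre_sort_paths_by_marker list_of_lists list_of_orders) := by unfold Pre_sort_paths_by_marker; infer_instance

def pvWitness_sort_paths_by_marker : List (List String) × List (List String) :=
  ([["x.nd2_B.tif", "x.nd2_A.tif", "y.nd2_B.tif"]], [["A", "B"]])

def Spec_sort_paths_by_marker (list_of_lists : List (List String)) (list_of_orders : List (List String)) (out : List (List String)) : Prop := out = sort_paths_by_marker_alt list_of_lists list_of_orders
instance (list_of_lists : List (List String)) (list_of_orders : List (List String)) (out : List (List String)) : Decidable (Spec_sort_paths_by_marker list_of_lists list_of_orders out) := by unfold Spec_sort_paths_by_marker; infer_instance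

-- ===== CLAIM (what is proved, stated in full; the proofs are below) =====
def Claim_equal_sort_paths_by_marker : Prop := ∀ (list_of_lists : List (List String)) (list_of_orders : List (List String)), Dom_sort_paths_by_marker list_of_lists list_of_orders → Pre_sort_paths_by_marker list_of_lists list_of_orders → Spec_sort_paths_by_marker list_of_lists list_of_orders (sort_paths_by_marker list_of_lists list_of_orders)

-- ===== LEMMAS AND PROOFS =====

-- A's per-pair key
def pvKf (mo : List String) (x : String) : Nat :=
  (PySem.List.index? mo (pvMarkerOf x)).getD mo.length

-- closed form of B's per-pair emission, phrased on the tagged list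
def pvEmit : List String → List (String × String) → List String
  | [], _ => []
  | m :: os, t =>
      (t.filter (fun mp => mp.1 == m)).map Prod.snd ++
        pvEmit os (t.filter (fun mp => mp.1 != m))

theorem pvEmit_nil (os : List String) : pvEmit os [] = [] := by
  induction os with
  | nil => rfl
  | cons m os ih => simp [pvEmit, ih]

-- getD after erase
theorem pvGetD_erase (d : PySem.Dict String (List String)) (k k' : String) :
    (d.erase k).getD k' [] = if k' = k then [] else d.getD k' [] := by
  obtain ⟨items⟩ := d
  simp only [PySem.Dict.erase, PySem.Dict.getD, PySem.Dict.get?]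
  induction items with
  | nil => split <;> simp
  | cons p rest ih =>
      by_cases hpk : p.1 = k
      · rw [List.filter_cons, if_neg (by simp [hpk])]
        by_cases hk : k' = k
        · rw [if_pos hk] at ih ⊢
          exact ih
        · rw [if_neg hk] at ih ⊢
          rw [List.find?_cons_of_neg (by simp [hpk]; exact fun h => hk h.symm)]
          exact ih
      · rw [List.filter_cons, if_pos (by simp [hpk])]
        by_cases hpk' : p.1 = k'
        · have hk : ¬ k' = k := fun h => hpk (by rw [hpk', h])
          rw [if_neg hk, List.find?_cons_of_pos (by simp [hpk']),
            List.find?_cons_of_pos (by simp [hpk'])]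
        · rw [List.find?_cons_of_neg (by simp [hpk'])]
          by_cases hk : k' = k
          · rw [if_pos hk] at ih ⊢
            exact ih
          · rw [if_neg hk] at ih ⊢
            rw [List.find?_cons_of_neg (by simp [hpk'])]
            exact ih

-- B's sweep over marker_order, under the bucket characterisation, is pvEmit
theorem pvSweep_eq (os : List String) :
    ∀ (acc : List String) (d : PySem.Dict String (List String))
      (t : List (String × String)),
      (∀ m, d.getD m [] = (t.filter (fun mp => mp.1 == m)).map Prod.snd) →
      (os.foldl (fun st m => (st.1 ++ st.2.getD m [], st.2.erase m)) (acc, d)).1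
        = acc ++ pvEmit os t := by
  induction os with
  | nil => intro acc d t _; simp [pvEmit]
  | cons m os ih =>
      intro acc d t hd
      simp only [List.foldl_cons, pvEmit]
      rw [ih (acc ++ d.getD m []) (d.erase m) (t.filter (fun mp => mp.1 != m)) ?_]
      · rw [hd m, List.append_assoc]
      · intro m'
        rw [pvGetD_erase]
        by_cases hm : m' = m
        · subst hm
          rw [if_pos rfl]
          rw [List.filter_filter]
          have : ∀ mp : String × String, ((mp.1 == m') && (mp.1 != m')) = false := by
            intro mp; by_cases h : mp.1 = m' <;> simp [h]
          simp [this]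
        · rw [if_neg hm, hd m', List.filter_filter]
          congr 1
          apply List.filter_congr
          intro mp _
          by_cases h : mp.1 = m'
          · simp [h, hm]
          · simp [h]

theorem pvIndex?_append_not_mem {v : String} :
    ∀ (pre l : List String), v ∉ pre →
      PySem.List.index? (pre ++ l) v = (PySem.List.index? l v).map (· + pre.length) := by
  intro pre
  induction pre with
  | nil => intro l _; simp
  | cons a pre ih =>
      intro l hv
      have hne : a ≠ v := fun h => hv (by simp [h])
      rw [List.cons_append, PySem.List.index?_cons_of_ne _ hne, ih l (fun h => hv (by simp [h]))]
      cases PySem.List.index? l v <;> simp <;> omega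

theorem pvMem_emit : ∀ (os : List String) (t : List (String × String)) (y : String),
    y ∈ pvEmit os t → ∃ mp ∈ t, y = mp.2 ∧ mp.1 ∈ os := by
  intro os
  induction os with
  | nil => intro t y h; simp [pvEmit] at h
  | cons m os ih =>
      intro t y h
      simp only [pvEmit, List.mem_append] at h
      rcases h with h | h
      · rcases List.mem_map.1 h with ⟨mp, hmp, rfl⟩
        rcases List.mem_filter.1 hmp with ⟨hmem, hb⟩
        exact ⟨mp, hmem, rfl, by simp [beq_iff_eq] at hb; simp [hb]⟩
      · rcases ih _ _ h with ⟨mp, hmp, rfl, hmo⟩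
        exact ⟨mp, (List.mem_filter.1 hmp).1, rfl, by simp [hmo]⟩

theorem pvInsertBy_cons {α : Type} (before : α → α → Bool) (x a : α) (l : List α) :
    PySem.List.insertBy before x (a :: l)
      = if before x a then x :: a :: l else a :: PySem.List.insertBy before x l := rfl

theorem pvInsertBy_skip {α : Type} (before : α → α → Bool) (x : α) :
    ∀ (pre ys : List α), (∀ y ∈ pre, before x y = false) →
      PySem.List.insertBy before x (pre ++ ys) = pre ++ PySem.List.insertBy before x ys := by
  intro pre
  induction pre with
  | nil => intro ys _; rfl
  | cons a pre ih =>
      intro ys h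
      rw [List.cons_append, pvInsertBy_cons, if_neg (by simp [h a (by simp)]),
        ih ys (fun y hy => h y (by simp [hy]))]
      rfl

theorem pvInsertBy_front {α : Type} (before : α → α → Bool) (x : α) (ys : List α)
    (h : ∀ y ∈ ys, before x y = true) :
    PySem.List.insertBy before x ys = x :: ys := by
  cases ys with
  | nil => rfl
  | cons a l => rw [pvInsertBy_cons, if_pos (h a (by simp))]

-- the heart: appending one tagged path to the emission's input inserts it stably by A's key
theorem pvEmit_insert (mo : List String) :
    ∀ (os pre : List String) (t : List (String × String)) (x : String),
      mo = pre ++ os →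
      (∀ mp ∈ t, mp.1 = pvMarkerOf mp.2) →
      pvMarkerOf x ∈ os → pvMarkerOf x ∉ pre →
      (∀ mp ∈ t, mp.1 ∈ os ∧ mp.1 ∉ pre) →
      pvEmit os (t ++ [(pvMarkerOf x, x)]) =
        PySem.List.insertBy (fun a b => decide (pvKf mo a < pvKf mo b)) x (pvEmit os t) := by
  intro os
  induction os with
  | nil => intro pre t x _ _ hx; simp at hx
  | cons m os ih =>
      intro pre t x hmo h1 hxin hxpre h3
      have hkey : ∀ (y : String), pvMarkerOf y ∈ m :: os → pvMarkerOf y ∉ pre →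
          pvKf mo y = ((PySem.List.index? (m :: os) (pvMarkerOf y)).getD (m :: os).length) + pre.length := by
        intro y hy hyp
        unfold pvKf
        rw [hmo, pvIndex?_append_not_mem _ _ hyp]
        rcases Option.isSome_iff_exists.1 ((PySem.List.index?_isSome_iff _ _).2 hy) with ⟨k, hk⟩
        rw [hk]
        rfl
      by_cases hm : pvMarkerOf x = m
      · -- x goes at the end of the head bucket
        have hfilt1 : (t ++ [(pvMarkerOf x, x)]).filter (fun mp => mp.1 == m)
            = t.filter (fun mp => mp.1 == m) ++ [(pvMarkerOf x, x)] := by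
          simp [List.filter_append, hm]
        have hfilt2 : (t ++ [(pvMarkerOf x, x)]).filter (fun mp => mp.1 != m)
            = t.filter (fun mp => mp.1 != m) := by
          simp [List.filter_append, hm]
        have hbucket_false : ∀ y ∈ (t.filter (fun mp => mp.1 == m)).map Prod.snd,
            (fun a b => decide (pvKf mo a < pvKf mo b)) x y = false := by
          intro y hy
          rcases List.mem_map.1 hy with ⟨mp, hmp, rfl⟩
          rcases List.mem_filter.1 hmp with ⟨hmem, hb⟩
          have hbm : mp.1 = m := by simpa [beq_iff_eq] using hb
          have hmy : pvMarkerOf mp.2 = m := by rw [← h1 mp hmem]; exact hbm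
          have h3' := h3 mp hmem
          have hnp : pvMarkerOf mp.2 ∉ pre := by rw [← h1 mp hmem]; exact h3'.2
          have e1 : pvKf mo mp.2 = pvKf mo x := by
            rw [hkey mp.2 (by simp [hmy]) hnp, hkey x (by simp [hm]) hxpre, hmy, hm]
          simp [e1]
        have hrest_true : ∀ y ∈ pvEmit os (t.filter (fun mp => mp.1 != m)),
            (fun a b => decide (pvKf mo a < pvKf mo b)) x y = true := by
          intro y hy
          rcases pvMem_emit _ _ _ hy with ⟨mp, hmp, rfl, hmpos⟩
          rcases List.mem_filter.1 hmp with ⟨hmem, hb⟩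
          have hne : mp.1 ≠ m := by simpa [bne_iff_ne] using hb
          have hmy : pvMarkerOf mp.2 = mp.1 := (h1 mp hmem).symm
          have h3' := h3 mp hmem
          have hk1 : pvKf mo x = (m :: os).length - (m :: os).length + pre.length := by
            rw [hkey x (by simp [hm]) hxpre, hm, PySem.List.index?_cons_self]; simp
          have hisome : (PySem.List.index? os mp.1).isSome :=
            (PySem.List.index?_isSome_iff _ _).2 hmpos
          rcases Option.isSome_iff_exists.1 hisome with ⟨k, hk⟩
          have hk2 : pvKf mo mp.2 = k + 1 + pre.length := by
            rw [hkey mp.2 (by simp [hmy, hmpos]) (by rw [hmy]; exact h3'.2), hmy,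
              PySem.List.index?_cons_of_ne _ (Ne.symm hne), hk]
            simp
          simp [hk1, hk2]
        rw [pvEmit, hfilt1, hfilt2, List.map_append, pvEmit]
        rw [List.append_assoc]
        rw [pvInsertBy_skip _ _ _ _ hbucket_false,
          pvInsertBy_front _ _ _ hrest_true]
        simp
      · -- x belongs to a later bucket: skip the head bucket and recurse
        have hxos : pvMarkerOf x ∈ os := by
          rcases List.mem_cons.1 hxin with h | h
          · exact absurd h hm
          · exact h
        have hfilt1 : (t ++ [(pvMarkerOf x, x)]).filter (fun mp => mp.1 == m)
            = t.filter (fun mp => mp.1 == m) := by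
          simp [List.filter_append, hm]
        have hfilt2 : (t ++ [(pvMarkerOf x, x)]).filter (fun mp => mp.1 != m)
            = t.filter (fun mp => mp.1 != m) ++ [(pvMarkerOf x, x)] := by
          simp [List.filter_append, hm]
        have h1' : ∀ mp ∈ t.filter (fun mp => mp.1 != m), mp.1 = pvMarkerOf mp.2 :=
          fun mp hmp => h1 mp (List.mem_filter.1 hmp).1
        have h3' : ∀ mp ∈ t.filter (fun mp => mp.1 != m), mp.1 ∈ os ∧ mp.1 ∉ pre ++ [m] := by
          intro mp hmp
          rcases List.mem_filter.1 hmp with ⟨hmem, hb⟩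
          have hne : mp.1 ≠ m := by simpa [bne_iff_ne] using hb
          have h3'' := h3 mp hmem
          refine ⟨?_, ?_⟩
          · rcases List.mem_cons.1 h3''.1 with h | h
            · exact absurd h hne
            · exact h
          · simp [h3''.2, hne]
        have hbucket_false : ∀ y ∈ (t.filter (fun mp => mp.1 == m)).map Prod.snd,
            (fun a b => decide (pvKf mo a < pvKf mo b)) x y = false := by
          intro y hy
          rcases List.mem_map.1 hy with ⟨mp, hmp, rfl⟩
          rcases List.mem_filter.1 hmp with ⟨hmem, hb⟩
          have hbm : mp.1 = m := by simpa [beq_iff_eq] using hb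
          have hmy : pvMarkerOf mp.2 = m := by rw [← h1 mp hmem]; exact hbm
          have h3'' := h3 mp hmem
          have hmpre : m ∉ pre := hbm ▸ h3''.2
          have hk1 : pvKf mo mp.2 = pre.length := by
            rw [hkey mp.2 (by simp [hmy]) (by rw [hmy]; exact hmpre), hmy, PySem.List.index?_cons_self]
            simp
          have hisome : (PySem.List.index? os (pvMarkerOf x)).isSome :=
            (PySem.List.index?_isSome_iff _ _).2 hxos
          rcases Option.isSome_iff_exists.1 hisome with ⟨k, hk⟩
          have hk2 : pvKf mo x = k + 1 + pre.length := by
            rw [hkey x hxin hxpre, PySem.List.index?_cons_of_ne _ (Ne.symm hm), hk]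
            simp
          simp [hk1, hk2]
        rw [pvEmit, hfilt1, hfilt2, pvEmit,
          ih (pre ++ [m]) (t.filter (fun mp => mp.1 != m)) x (by simp [hmo]) h1' hxos
            (by simp [hxpre, hm]) h3',
          pvInsertBy_skip _ _ _ _ hbucket_false]

-- per-pair agreement: A's stable sort equals B's bucket emission
theorem pvPair_eq (mo : List String) (paths : List String)
    (h : ∀ p ∈ paths, pvMarkerOf p ∈ mo) :
    PySem.List.sorted paths (pvKf mo)
      = pvEmit mo (paths.map (fun p => (pvMarkerOf p, p))) := by
  induction paths using List.reverseRecOn with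
  | nil => rw [PySem.List.sorted_eq_foldl_insertBy]; simp [pvEmit_nil]
  | append_singleton paths x ih =>
      have hx : pvMarkerOf x ∈ mo := h x (by simp)
      have hpaths : ∀ p ∈ paths, pvMarkerOf p ∈ mo := fun p hp => h p (by simp [hp])
      rw [PySem.List.sorted_eq_foldl_insertBy, List.foldl_append, List.foldl_cons, List.foldl_nil,
        ← PySem.List.sorted_eq_foldl_insertBy, ih hpaths, List.map_append, List.map_cons, List.map_nil]
      rw [pvEmit_insert mo mo [] (paths.map (fun p => (pvMarkerOf p, p))) x rfl
        (by intro mp hmp; rcases List.mem_map.1 hmp with ⟨p, _, rfl⟩; rfl)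
        hx (by simp)
        (by intro mp hmp; rcases List.mem_map.1 hmp with ⟨p, hp, rfl⟩; simp [hpaths p hp])]

theorem pvFoldl_append_eq_map {α β : Type} (f : α → β) :
    ∀ (l : List α) (acc : List β),
      l.foldl (fun a pr => a ++ [f pr]) acc = acc ++ l.map f := by
  intro l
  induction l with
  | nil => intro acc; simp
  | cons x l ih => intro acc; simp [ih]

-- B's bucket build characterised by lookup
theorem pvBuckets_getD (paths : List String) (m : String) :
    (paths.foldl (fun d p => d.modify (pvMarkerOf p) [] (· ++ [p]))
        (PySem.Dict.empty : PySem.Dict String (List String))).getD m []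
      = ((paths.map (fun p => (pvMarkerOf p, p))).filter
          (fun mp => mp.1 == m)).map Prod.snd := by
  have h : (paths.map (fun p => (pvMarkerOf p, p))).foldl
        (fun d q => d.modify q.1 [] (· ++ [q.2]))
        (PySem.Dict.empty : PySem.Dict String (List String))
      = paths.foldl (fun d p => d.modify (pvMarkerOf p) [] (· ++ [p]))
        PySem.Dict.empty := by
    rw [List.foldl_map]
  rw [← h, PySem.Dict.getD_foldl_modify_append]
  simp

-- ===== VERDICT (by name: the statement is the Claim_ definition above) =====
theorem sort_paths_by_marker_spec : Claim_equal_sort_paths_by_marker := by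
  intro lol loo _ hpre
  unfold Spec_sort_paths_by_marker sort_paths_by_marker sort_paths_by_marker_alt
  rw [pvFoldl_append_eq_map, pvFoldl_append_eq_map]
  simp only [List.nil_append]
  apply List.map_congr_left
  intro pr hpr
  have hp := hpre pr hpr
  rw [pvSweep_eq pr.2 [] _ (pr.1.map (fun p => (pvMarkerOf p, p)))
      (fun m => pvBuckets_getD pr.1 m),
    List.nil_append, ← pvPair_eq pr.2 pr.1 hp]
  rfl
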